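-- pv_equiv track=rewrite | github.com/polymonster/pmtech | tools/build_scripts/stub_format.py | align_consecutive
-- ===== SOURCE A (Python) =====
-- def align_consecutive(file_data, align_char):
--     lines = file_data.split("\n")
--     align_lines = []
--     alignment_pos = -1
--     output = ""
--     for line in lines:
--         pos = line.find(align_char)
--         if pos != -1:
--             alignment_pos = max(pos, alignment_pos)
--             align_lines.append(line)
--         else:
--             for align in align_lines:
--                 pos = align.find(align_char)
--                 pad = alignment_pos - pos
--                 string_pad = ""
--                 for i in range(0, pad):
--                     string_pad += " "
--                 output += align[:pos] + string_pad + align[pos:] + "\n"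
--             align_lines.clear()
--             alignment_pos = -1
--             output += line + "\n"
--     return output
-- ===== SOURCE B (Python) =====
-- def align_consecutive(file_data, align_char):
--     # Repeatedly locate the first separator line (no align_char), slice out the
--     # whole segment before it, format that segment at its max align position,
--     # then continue on the suffix; a trailing segment with no separator is dropped.
--     lines = file_data.split("\n")
--     out = []
--     while True:
--         for i, line in enumerate(lines):
--             if line.find(align_char) == -1:
--                 break
--         else:
--             return "".join(out)
--         group = lines[:i]
--         t = max((l.find(align_char) for l in group), default=-1)
--         for l in group:
--             p = l.find(align_char)
--             out.append(l[:p] + " " * (t - p) + l[p:] + "\n")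
--         out.append(line + "\n")
--         lines = lines[i + 1:]
-- ===== Notes on version B (the rewrite author's own statement) =====
-- stated objective: alternative
-- what changed: B has no line-buffer state machine at all: it repeatedly scans for the FIRST separator line, slices the whole preceding segment out in one go, computes its max align position with max(...,default=-1), formats the segment and loops on the remaining suffix, joining collected parts once; A streams line by line with a mutable buffer, a running max and a flush-on-separator, growing the output string and building pads by a character-append loop.
import Mathlib
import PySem

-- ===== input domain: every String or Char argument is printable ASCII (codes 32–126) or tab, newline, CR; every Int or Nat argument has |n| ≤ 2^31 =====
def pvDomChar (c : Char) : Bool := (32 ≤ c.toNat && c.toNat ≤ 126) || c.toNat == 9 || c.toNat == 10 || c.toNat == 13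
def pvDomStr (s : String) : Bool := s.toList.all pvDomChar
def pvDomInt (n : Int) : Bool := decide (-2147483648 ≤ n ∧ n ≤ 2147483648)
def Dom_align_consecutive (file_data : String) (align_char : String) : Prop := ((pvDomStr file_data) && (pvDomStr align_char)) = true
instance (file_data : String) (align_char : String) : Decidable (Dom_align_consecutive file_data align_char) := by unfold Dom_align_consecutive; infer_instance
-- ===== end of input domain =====

-- B drops A's streaming buffer/running-max/flush state machine: it repeatedly finds the FIRST
-- separator line, slices the whole preceding segment out at once, formats it at its
-- max(..., default=-1) align position and continues on the suffix, joining parts once.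

-- ===== PORT A =====
-- string_pad built by the literal 'for i in range(0, pad): string_pad += " "' loop
def pvPadA (pad : Int) : String :=
  (PySem.List.pyRange 0 pad 1).foldl (fun sp _ => sp ++ " ") ""

-- body of 'for align in align_lines:' (apos = alignment_pos at flush time)
def pvFlushA (align_char : String) (apos : Int) (out : String) (a : String) : String :=
  let pos := PySem.Str.find a align_char
  out ++ PySem.Str.slice a none (some pos) ++ pvPadA (apos - pos)
      ++ PySem.Str.slice a (some pos) none ++ "\n"

-- body of 'for line in lines:' over the state (align_lines, alignment_pos, output)
def pvStepA (align_char : String) (s : List String × Int × String) (line : String) :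
    List String × Int × String :=
  let pos := PySem.Str.find line align_char
  if pos ≠ -1 then
    (s.1 ++ [line], max pos s.2.1, s.2.2)
  else
    ([], -1, (s.1.foldl (pvFlushA align_char s.2.1) s.2.2) ++ line ++ "\n")

def align_consecutive (file_data : String) (align_char : String) : String :=
  -- file_data.split("\n"): the separator "\n" is nonempty, so split? is always some; getD never fires
  let lines := (PySem.Str.split? file_data "\n").getD []
  (lines.foldl (pvStepA align_char) ([], -1, "")).2.2

-- ===== PORT B =====
-- l[:p] + " " * (t - p) + l[p:] + "\n"  (Python's " " * k is empty for k ≤ 0, as is replicate k.toNat)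
def pvFmtB (align_char : String) (t : Int) (l : String) : String :=
  let p := PySem.Str.find l align_char
  PySem.Str.slice l none (some p) ++ String.ofList (List.replicate (t - p).toNat ' ')
      ++ PySem.Str.slice l (some p) none ++ "\n"

-- the 'for i, line in enumerate(lines): if line.find(align_char) == -1: break' scan:
-- index and line of the first separator, none if the for-loop falls through to its else
def pvFirstSep (align_char : String) : List String → Nat → Option (Nat × String)
  | [], _ => none
  | l :: rest, i =>
      if PySem.Str.find l align_char = -1 then some (i, l)
      else pvFirstSep align_char rest (i + 1)

-- termination of the while loop: the first separator's index is inside the list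
theorem pvFirstSep_lt (align_char : String) :
    ∀ (lines : List String) (j i : Nat) (sep : String),
      pvFirstSep align_char lines j = some (i, sep) → i < j + lines.length := by
  intro lines
  induction lines with
  | nil => intro j i sep h; simp [pvFirstSep] at h
  | cons l rest ih =>
    intro j i sep h
    simp only [pvFirstSep] at h
    split_ifs at h with hf
    · simp only [Option.some.injEq, Prod.mk.injEq] at h
      simp only [List.length_cons]; omega
    · have := ih (j + 1) i sep h; simp [List.length_cons]; omega

-- the 'while True:' loop; out is the list of collected parts
def pvGo (align_char : String) (out : List String) (lines : List String) : String :=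
  match hfs : pvFirstSep align_char lines 0 with
  | none => PySem.Str.join "" out
  | some (i, sep) =>
    let group := PySem.List.slice lines none (some (i : Int))
    let t := PySem.List.maxD (group.map (fun l => PySem.Str.find l align_char)) (fun x => x) (-1)
    pvGo align_char
      ((group.foldl (fun os l => os ++ [pvFmtB align_char t l]) out) ++ [sep ++ "\n"])
      (PySem.List.slice lines (some ((i : Int) + 1)) none)
termination_by lines.length
decreasing_by
  have hi := pvFirstSep_lt align_char lines 0 i sep hfs
  have : ((i : Int) + 1) = ((i + 1 : Nat) : Int) := by push_cast; ring
  rw [this, PySem.List.slice_from_natCast, List.length_drop]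
  omega

def align_consecutive_alt (file_data : String) (align_char : String) : String :=
  let lines := (PySem.Str.split? file_data "\n").getD []
  pvGo align_char [] lines

-- ===== PRECONDITION & SPEC =====
def Spec_align_consecutive (file_data : String) (align_char : String) (out : String) : Prop := out = align_consecutive_alt file_data align_char
instance (file_data : String) (align_char : String) (out : String) : Decidable (Spec_align_consecutive file_data align_char out) := by unfold Spec_align_consecutive; infer_instance

-- ===== CLAIM (what is proved, stated in full; the proofs are below) =====
def Claim_equal_align_consecutive : Prop := ∀ (file_data : String) (align_char : String), Dom_align_consecutive file_data align_char → Spec_align_consecutive file_data align_char (align_consecutive file_data align_char)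

-- ===== LEMMAS AND PROOFS =====

theorem pv_intercalate_nil (l : List (List Char)) : List.intercalate [] l = l.flatten := by
  induction l with
  | nil => simp [List.intercalate]
  | cons a t ih =>
    cases t with
    | nil => simp [List.intercalate]
    | cons b u =>
      simp only [List.intercalate] at *
      simp [List.intersperse] at *
      simp [ih]

theorem pv_join_snoc (ps : List String) (x : String) :
    PySem.Str.join "" (ps ++ [x]) = PySem.Str.join "" ps ++ x := by
  apply String.toList_inj.mp
  simp [PySem.Str.join, PySem.Chars.join, pv_intercalate_nil]

theorem pv_pad_aux (L : List Int) (s : String) :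
    L.foldl (fun sp _ => sp ++ " ") s = s ++ String.ofList (List.replicate L.length ' ') := by
  induction L generalizing s with
  | nil => apply String.toList_inj.mp; simp
  | cons a t ih =>
    simp only [List.foldl_cons, ih]
    apply String.toList_inj.mp
    simp [List.replicate_succ]

theorem pv_pad_eq (pad : Int) : pvPadA pad = String.ofList (List.replicate pad.toNat ' ') := by
  have hlen : (PySem.List.pyRange 0 pad 1).length = pad.toNat := by
    rw [PySem.List.pyRange_of_pos 0 pad (by norm_num : (0:Int) < 1), List.length_map,
      List.length_range]
    split_ifs with h
    · simp only [show pad - 0 + 1 - 1 = pad by ring, Int.ediv_one]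
    · omega
  rw [pvPadA, pv_pad_aux, hlen]
  apply String.toList_inj.mp
  simp

theorem pv_flush_eq (ac : String) (apos : Int) (out a : String) :
    pvFlushA ac apos out a = out ++ pvFmtB ac apos a := by
  rw [pvFlushA, pvFmtB, pv_pad_eq]
  apply String.toList_inj.mp
  simp

theorem pv_group_fold (ac : String) (apos : Int) (g : List String) :
    ∀ (out : String) (P : List String), out = PySem.Str.join "" P →
      g.foldl (pvFlushA ac apos) out
        = PySem.Str.join "" (g.foldl (fun ps l => ps ++ [pvFmtB ac apos l]) P) := by
  induction g with
  | nil => intro out P h; simpa using h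
  | cons l t ih =>
    intro out P h
    simp only [List.foldl_cons]
    apply ih
    rw [pv_flush_eq, pv_join_snoc, h]

theorem pv_max_aux (f : String → Int) (g : List String) :
    ∀ (m : Int),
      g.foldl (fun acc l => max (f l) acc) m
        = ((g.map f).foldl
            (fun (acc : Option Int) x =>
              match acc with
              | none => some x
              | some mm => if mm < x then some x else some mm)
            (some m)).getD (-1) := by
  induction g with
  | nil => intro m; simp
  | cons l t ih =>
    intro m
    simp only [List.map_cons, List.foldl_cons]
    rw [ih (max (f l) m)]
    congr 2
    rcases lt_or_ge m (f l) with h | h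
    · rw [if_pos h, max_eq_left (le_of_lt h)]
    · rw [if_neg (not_lt.mpr h), max_eq_right h]

theorem pv_maxD_eq (f : String → Int) (hf : ∀ l, -1 ≤ f l) (g : List String) :
    PySem.List.maxD (g.map f) (fun x => x) (-1)
      = g.foldl (fun acc l => max (f l) acc) (-1) := by
  cases g with
  | nil => rfl
  | cons l t =>
    rw [List.foldl_cons, pv_max_aux, max_eq_left (hf l)]
    simp only [PySem.List.maxD, PySem.List.max?, List.map_cons, List.foldl_cons]
    congr 1
    exact congrFun (congrFun (congrArg List.foldl (by funext acc x; cases acc <;> rfl)) _) _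

theorem pv_find_ge (ac l : String) : -1 ≤ PySem.Str.find l ac := by
  simpa using PySem.Chars.neg_one_le_find l.toList ac.toList

theorem pv_firstSep_none (ac : String) (g : List String)
    (hg : ∀ l ∈ g, PySem.Str.find l ac ≠ -1) : ∀ j, pvFirstSep ac g j = none := by
  induction g with
  | nil => intro j; rfl
  | cons l t ih =>
    intro j
    simp only [pvFirstSep]
    rw [if_neg (hg l (by simp))]
    exact ih (fun x hx => hg x (by simp [hx])) (j + 1)

theorem pv_firstSep_some (ac : String) (g : List String)
    (hg : ∀ l ∈ g, PySem.Str.find l ac ≠ -1) (l : String) (hl : PySem.Str.find l ac = -1)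
    (rest : List String) :
    ∀ j, pvFirstSep ac (g ++ l :: rest) j = some (j + g.length, l) := by
  induction g with
  | nil =>
    intro j
    simp only [List.nil_append, pvFirstSep]
    rw [if_pos hl]
    simp
  | cons x t ih =>
    intro j
    simp only [List.cons_append, pvFirstSep]
    rw [if_neg (hg x (by simp))]
    rw [ih (fun y hy => hg y (by simp [hy])) (j + 1)]
    simp; omega

theorem pvGo_none (ac : String) (out lines : List String)
    (h : pvFirstSep ac lines 0 = none) : pvGo ac out lines = PySem.Str.join "" out := by
  rw [pvGo, h]

theorem pvGo_some (ac : String) (out lines : List String) (i : Nat) (sep : String)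
    (h : pvFirstSep ac lines 0 = some (i, sep)) :
    pvGo ac out lines
      = pvGo ac
          (((PySem.List.slice lines none (some (i : Int))).foldl
              (fun os l => os ++ [pvFmtB ac
                (PySem.List.maxD ((PySem.List.slice lines none (some (i : Int))).map
                  (fun l => PySem.Str.find l ac)) (fun x => x) (-1)) l]) out)
            ++ [sep ++ "\n"])
          (PySem.List.slice lines (some ((i : Int) + 1)) none) := by
  rw [pvGo, h]

theorem pv_main (ac : String) (lines : List String) :
    ∀ (g outL : List String),
      (∀ l ∈ g, PySem.Str.find l ac ≠ -1) →
      (lines.foldl (pvStepA ac)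
          (g, g.foldl (fun acc l => max (PySem.Str.find l ac) acc) (-1),
           PySem.Str.join "" outL)).2.2
        = pvGo ac outL (g ++ lines) := by
  induction lines with
  | nil =>
    intro g outL hg
    simp only [List.foldl_nil, List.append_nil]
    rw [pvGo_none ac outL g (pv_firstSep_none ac g hg 0)]
  | cons l rest ih =>
    intro g outL hg
    simp only [List.foldl_cons]
    by_cases hf : PySem.Str.find l ac ≠ -1
    · have hstep : pvStepA ac (g, g.foldl (fun acc l => max (PySem.Str.find l ac) acc) (-1),
          PySem.Str.join "" outL) l
          = (g ++ [l], (g ++ [l]).foldl (fun acc l => max (PySem.Str.find l ac) acc) (-1),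
             PySem.Str.join "" outL) := by
        simp only [pvStepA]
        rw [if_pos hf, List.foldl_append, List.foldl_cons, List.foldl_nil]
      rw [hstep, ih (g ++ [l]) outL
        (by intro x hx; rcases List.mem_append.mp hx with h | h
            · exact hg x h
            · simp at h; subst h; exact hf)]
      rw [List.append_assoc]; rfl
    · rw [not_not] at hf
      have hstep : pvStepA ac (g, g.foldl (fun acc l => max (PySem.Str.find l ac) acc) (-1),
          PySem.Str.join "" outL) l
          = ([], -1,
             (g.foldl (pvFlushA ac (g.foldl (fun acc l => max (PySem.Str.find l ac) acc) (-1)))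
               (PySem.Str.join "" outL)) ++ l ++ "\n") := by
        simp only [pvStepA]
        rw [if_neg (by simpa using hf)]
      rw [hstep]
      -- B's side: the first separator of g ++ l :: rest is l at index g.length
      rw [pvGo_some ac outL (g ++ l :: rest) g.length l
        (by simpa using pv_firstSep_some ac g hg l hf rest 0)]
      have hslice1 : PySem.List.slice (g ++ l :: rest) none (some ((g.length : Nat) : Int)) = g := by
        rw [PySem.List.slice_to_natCast]; simp
      have hslice2 : PySem.List.slice (g ++ l :: rest) (some (((g.length : Nat) : Int) + 1)) none
          = rest := by
        have hc : ((g.length : Nat) : Int) + 1 = ((g.length + 1 : Nat) : Int) := by push_cast; ring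
        rw [hc, PySem.List.slice_from_natCast]
        simpa using List.drop_append (l₁ := g) (l₂ := l :: rest) (i := 1)
      rw [hslice1, hslice2]
      have hout : (g.foldl (pvFlushA ac (g.foldl (fun acc l' => max (PySem.Str.find l' ac) acc) (-1)))
            (PySem.Str.join "" outL)) ++ l ++ "\n"
          = PySem.Str.join "" ((g.foldl (fun os l' => os ++ [pvFmtB ac
              (PySem.List.maxD (g.map (fun l' => PySem.Str.find l' ac)) (fun x => x) (-1)) l']) outL)
            ++ [l ++ "\n"]) := by
        rw [pv_join_snoc, pv_maxD_eq (fun l' => PySem.Str.find l' ac) (fun l' => pv_find_ge ac l') g,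
          pv_group_fold ac _ g (PySem.Str.join "" outL) outL rfl]
        apply String.toList_inj.mp
        simp
      rw [hout]
      exact ih [] _ (by intro x hx; simp at hx)

-- ===== VERDICT (by name: the statement is the Claim_ definition above) =====
theorem align_consecutive_spec : Claim_equal_align_consecutive := by
  intro file_data align_char _
  show align_consecutive file_data align_char = align_consecutive_alt file_data align_char
  rw [align_consecutive, align_consecutive_alt]
  have h := pv_main align_char ((PySem.Str.split? file_data "\n").getD []) [] []
    (by intro x hx; simp at hx)
  simp only [List.foldl_nil, List.nil_append] at h
  have hj : PySem.Str.join "" ([] : List String) = "" := rfl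
  rw [hj] at h
  exact h
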